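-- pv_equiv track=rewrite | github.com/southlandp/advent_of_code_2021 | advent_code/day_01.py | sonar_sweep
-- ===== SOURCE A (Python) =====
-- def sonar_sweep(rows):
--     """
--     counts the number of entries that have a higher value than the previous
--
--     :param rows: list of depth values
--     :type rows: list
--
--     :return: number of entries in rows that have a higher value than the previous
--     :rtype: int
--     """
--
--     current_depth = None
--     depth_increases = 0
--     for row in rows:
--         row = int(row)
--         if not current_depth:
--             pass
--         elif row > current_depth:
--             depth_increases += 1
--         current_depth = row
--
--     return depth_increases
-- ===== SOURCE B (Python) =====
-- def sonar_sweep(rows):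
--     ints = [int(r) for r in rows]
--
--     def count(lo, hi):
--         # increases strictly inside ints[lo:hi] (junction pairs included)
--         if hi - lo < 2:
--             return 0
--         mid = (lo + hi) // 2
--         return count(lo, mid) + count(mid, hi) + (1 if ints[mid] > ints[mid - 1] else 0)
--
--     return count(0, len(ints))
-- ===== Notes on version B (the rewrite author's own statement) =====
-- stated objective: alternative
-- what changed: Replaces the linear previous-tracking accumulator loop with a divide-and-conquer recursion on index intervals (count halves, add the junction comparison), and drops A's falsy-zero guard (intended difference).
-- intended difference: On lists containing a 0 immediately followed by a larger value, A's 'not current_depth' treats the previous depth 0 as unset and misses that increase (returns a smaller count), while B counts it, which is the intended behaviour of counting entries greater than their predecessor. — e.g. on sonar_sweep([1, 0, 3]): A returns 0, B returns 1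
import Mathlib
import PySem

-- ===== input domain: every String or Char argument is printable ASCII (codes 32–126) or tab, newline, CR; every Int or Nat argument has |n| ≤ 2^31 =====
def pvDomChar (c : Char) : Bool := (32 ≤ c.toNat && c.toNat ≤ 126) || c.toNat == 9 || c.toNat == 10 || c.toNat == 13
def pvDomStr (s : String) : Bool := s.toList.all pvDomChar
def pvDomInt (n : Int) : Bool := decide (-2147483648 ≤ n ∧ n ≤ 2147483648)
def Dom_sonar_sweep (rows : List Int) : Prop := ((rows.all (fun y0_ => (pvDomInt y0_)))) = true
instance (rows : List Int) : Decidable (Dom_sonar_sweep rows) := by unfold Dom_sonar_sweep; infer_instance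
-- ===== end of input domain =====

-- B replaces A's previous-tracking accumulator loop by a divide-and-conquer recursion on
-- index intervals, and drops A's falsy-zero guard (intended difference D_ below).

-- ===== PORT A =====
-- state: (current_depth : Option Int  -- None initially --, depth_increases)
def sonar_sweep (rows : List Int) : Int :=
  (rows.foldl (fun (st : Option Int × Int) row =>
      -- row = int(row) is the identity on ints
      let inc : Int :=
        match st.1 with
        | none => st.2                       -- 'if not current_depth: pass' (None is falsy)
        | some c =>
          if c = 0 then st.2                 -- 0 is falsy too: comparison suppressed
          else if row > c then st.2 + 1
          else st.2
      (some row, inc)) (none, 0)).2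

-- ===== PORT B =====
-- count(lo, hi) of Source B; lo, hi are Nat since in Python they are always 0 ≤ lo ≤ hi ≤ len
-- (so (lo+hi)//2 is Nat division); ints[mid] / ints[mid-1] are always in range, ported as getD.
def dcCount (ints : List Int) (lo hi : Nat) : Int :=
  if hi - lo < 2 then 0
  else
    let mid := (lo + hi) / 2
    dcCount ints lo mid + dcCount ints mid hi +
      (if ints.getD mid 0 > ints.getD (mid - 1) 0 then 1 else 0)
termination_by hi - lo
decreasing_by all_goals omega

def sonar_sweep_alt (rows : List Int) : Int :=
  -- ints = rows (int(r) is the identity on ints)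
  dcCount rows 0 rows.length

-- ===== PRECONDITION & SPEC =====
-- On lists with a 0 immediately followed by a larger value, A's 'not current_depth'
-- treats previous depth 0 as unset and misses that increase; B counts it, which is the
-- intended behaviour of counting entries greater than their predecessor.
def D_sonar_sweep (rows : List Int) : Prop :=
  ∃ p ∈ rows.zip (rows.drop 1), p.1 = 0 ∧ 0 < p.2
instance (rows : List Int) : Decidable (D_sonar_sweep rows) := by
  unfold D_sonar_sweep; infer_instance

def Spec_sonar_sweep (rows : List Int) (out : Int) : Prop :=
  ¬ D_sonar_sweep rows → out = sonar_sweep_alt rows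
instance (rows : List Int) (out : Int) : Decidable (Spec_sonar_sweep rows out) := by
  unfold Spec_sonar_sweep; infer_instance

def pvDiffWitness_sonar_sweep : List Int := [1, 0, 3]
def pvDiffWitnessOut_sonar_sweep : Int × Int := (0, 1)

-- ===== CLAIM =====
def Claim_unchanged_sonar_sweep : Prop :=
  ∀ (rows : List Int), Dom_sonar_sweep rows → Spec_sonar_sweep rows (sonar_sweep rows)
def Claim_changed_sonar_sweep : Prop :=
  Dom_sonar_sweep (pvDiffWitness_sonar_sweep) ∧ D_sonar_sweep (pvDiffWitness_sonar_sweep) ∧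
  sonar_sweep (pvDiffWitness_sonar_sweep) = pvDiffWitnessOut_sonar_sweep.1 ∧
  sonar_sweep_alt (pvDiffWitness_sonar_sweep) = pvDiffWitnessOut_sonar_sweep.2 ∧
  pvDiffWitnessOut_sonar_sweep.1 ≠ pvDiffWitnessOut_sonar_sweep.2
def Claim_exact_sonar_sweep : Prop :=
  ∀ (rows : List Int), Dom_sonar_sweep rows → D_sonar_sweep rows →
    sonar_sweep rows ≠ sonar_sweep_alt rows

-- ===== LEMMAS AND PROOFS =====

-- guarded pairwise count, previous value c (A's behaviour after the first element)
def gA : Int → List Int → Int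
  | _, [] => 0
  | c, b :: t => (if c ≠ 0 ∧ b > c then 1 else 0) + gA b t

-- unguarded pairwise count, previous value c (the intended count, B's behaviour)
def gB : Int → List Int → Int
  | _, [] => 0
  | c, b :: t => (if b > c then 1 else 0) + gB b t

theorem foldA_some (l : List Int) : ∀ (c n : Int),
    (l.foldl (fun (st : Option Int × Int) row =>
      let inc : Int :=
        match st.1 with
        | none => st.2
        | some c =>
          if c = 0 then st.2
          else if row > c then st.2 + 1
          else st.2
      (some row, inc)) (some c, n)).2 = n + gA c l := by
  induction l with
  | nil => intro c n; simp [gA]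
  | cons b t ih =>
    intro c n
    simp only [List.foldl_cons, ih, gA]
    by_cases h0 : c = 0
    · simp [h0]
    · by_cases hb : b > c
      · simp [h0, hb]; ring
      · simp [h0, hb]

theorem sonar_sweep_cons (a : Int) (t : List Int) :
    sonar_sweep (a :: t) = gA a t := by
  unfold sonar_sweep
  simp only [List.foldl_cons]
  rw [foldA_some]
  ring

-- interval count: increases at indices lo < i < hi
def cnt (ints : List Int) (lo hi : Nat) : Int :=
  ∑ i ∈ Finset.Ico (lo + 1) hi,
    (if ints.getD i 0 > ints.getD (i - 1) 0 then (1 : Int) else 0)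

theorem dc_eq_cnt (ints : List Int) : ∀ (n lo hi : Nat), hi - lo = n →
    dcCount ints lo hi = cnt ints lo hi := by
  intro n
  induction n using Nat.strong_induction_on with
  | _ n ih =>
    intro lo hi hn
    rw [dcCount]
    by_cases hsmall : hi - lo < 2
    · rw [if_pos hsmall]
      have : Finset.Ico (lo + 1) hi = ∅ := Finset.Ico_eq_empty (by omega)
      simp [cnt, this]
    · rw [if_neg hsmall]
      show dcCount ints lo ((lo + hi) / 2) + dcCount ints ((lo + hi) / 2) hi +
          (if ints.getD ((lo + hi) / 2) 0 > ints.getD ((lo + hi) / 2 - 1) 0 then (1 : Int) else 0) =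
        cnt ints lo hi
      set mid := (lo + hi) / 2 with hmid
      have h1 : lo + 1 ≤ mid := by omega
      have h2 : mid + 1 ≤ hi := by omega
      rw [ih (mid - lo) (by omega) lo mid rfl,
          ih (hi - mid) (by omega) mid hi rfl]
      unfold cnt
      rw [← Finset.sum_Ico_consecutive _ h1 (by omega : mid ≤ hi),
          Finset.sum_eq_sum_Ico_succ_bot (by omega : mid < hi)]
      ring

theorem gB_sum (t : List Int) : ∀ (a : Int),
    gB a t = ∑ j ∈ Finset.range t.length,
      (if (a :: t).getD (j + 1) 0 > (a :: t).getD j 0 then (1 : Int) else 0) := by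
  induction t with
  | nil => intro a; simp [gB]
  | cons b t ih =>
    intro a
    rw [gB, ih b, List.length_cons, Finset.sum_range_succ']
    simp only [List.getD_cons_succ, List.getD_cons_zero]
    ring

theorem cnt_eq_gB (a : Int) (t : List Int) :
    cnt (a :: t) 0 (a :: t).length = gB a t := by
  rw [gB_sum]
  unfold cnt
  rw [Finset.sum_Ico_eq_sum_range]
  simp only [List.length_cons, Nat.add_sub_cancel]
  apply Finset.sum_congr rfl
  intro j _
  have : 1 + j - 1 = j := by omega
  rw [this, add_comm 1 j]

theorem sonar_sweep_alt_cons (a : Int) (t : List Int) :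
    sonar_sweep_alt (a :: t) = gB a t := by
  unfold sonar_sweep_alt
  rw [dc_eq_cnt (a :: t) ((a :: t).length - 0) 0 (a :: t).length rfl, cnt_eq_gB]

-- the two counts, compared: gA misses exactly the (0, positive) steps
theorem gA_le_gB (l : List Int) : ∀ (c : Int), gA c l ≤ gB c l := by
  induction l with
  | nil => intro c; simp [gA, gB]
  | cons b t ih =>
    intro c
    simp only [gA, gB]
    have := ih b
    by_cases h : c ≠ 0 ∧ b > c
    · simp [h]; omega
    · have : (if c ≠ 0 ∧ b > c then (1:Int) else 0) = 0 := by simp [h]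
      rw [this]
      split <;> omega

theorem gA_eq_gB_of_no_zero (l : List Int) : ∀ (c : Int),
    (∀ p ∈ (c :: l).zip l, ¬ (p.1 = 0 ∧ 0 < p.2)) → gA c l = gB c l := by
  induction l with
  | nil => intro c _; simp [gA, gB]
  | cons b t ih =>
    intro c h
    simp only [gA, gB]
    have hcb : ¬ (c = 0 ∧ 0 < b) := h (c, b) (by simp)
    have ht : gA b t = gB b t := by
      apply ih
      intro p hp
      exact h p (by simp [List.zip_cons_cons]; right; simpa using hp)
    rw [ht]
    by_cases h0 : c = 0
    · have hb : ¬ 0 < b := fun hb => hcb ⟨h0, hb⟩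
      simp [h0, show ¬ b > 0 from hb]
    · simp [h0]

theorem gA_lt_gB_of_zero (l : List Int) : ∀ (c : Int),
    (∃ p ∈ (c :: l).zip l, p.1 = 0 ∧ 0 < p.2) → gA c l < gB c l := by
  induction l with
  | nil => intro c h; simp at h
  | cons b t ih =>
    intro c h
    simp only [gA, gB]
    simp only [List.zip_cons_cons, List.mem_cons] at h
    obtain ⟨p, hp, hp0⟩ := h
    rcases hp with rfl | hp
    · obtain ⟨hc, hb⟩ := hp0
      have := gA_le_gB t b
      simp [hc]
      omega
    · have ht := ih b ⟨p, hp, hp0⟩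
      have h1 : (if c ≠ 0 ∧ b > c then (1:Int) else 0) ≤ (if b > c then (1:Int) else 0) := by
        by_cases hcb : c ≠ 0 ∧ b > c
        · simp [hcb]
        · split <;> simp_all <;> try omega
      omega

-- ===== VERDICT =====
theorem sonar_sweep_spec : Claim_unchanged_sonar_sweep := by
  intro rows _ hD
  cases rows with
  | nil =>
    unfold sonar_sweep_alt
    rw [dcCount]
    simp [sonar_sweep]
  | cons a t =>
    rw [sonar_sweep_cons, sonar_sweep_alt_cons]
    apply gA_eq_gB_of_no_zero
    intro p hp hc
    exact hD ⟨p, by simpa using hp, hc⟩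

theorem sonar_sweep_changed : Claim_changed_sonar_sweep := by
  unfold Claim_changed_sonar_sweep
  refine ⟨by decide, by decide, by decide, ?_, by decide⟩
  show sonar_sweep_alt [1, 0, 3] = 1
  rw [show ([1, 0, 3] : List Int) = 1 :: [0, 3] from rfl, sonar_sweep_alt_cons]
  decide

theorem sonar_sweep_tight : Claim_exact_sonar_sweep := by
  intro rows _ hD
  cases rows with
  | nil => simp [D_sonar_sweep] at hD
  | cons a t =>
    rw [sonar_sweep_cons, sonar_sweep_alt_cons]
    have := gA_lt_gB_of_zero t a (by simpa [D_sonar_sweep] using hD)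
    omega
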